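-- pv_equiv track=rewrite | github.com/sergioadll/python-loops | exercises/16-Techno_beat/app.py | lyrics_generator
-- ===== SOURCE A (Python) =====
-- def lyrics_generator(beat):
--     beatList=[]
--     n=" "
--     for x in beat:
--         if x==0:
--             beatList.append("Boom")
--         elif x==1:
--             beatList.append("Drop the base")
--         if len(beatList)>=3 and beatList[-3:].count("Drop the base")==3:
--             beatList.append("!!!Break the base!!!")
--
--     return n.join(beatList)
-- ===== SOURCE B (Python) =====
-- def lyrics_generator(beat):
--     out = []
--     run = 0
--     for x in beat:
--         if x == 0:
--             out.append("Boom")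
--             run = 0
--         elif x == 1:
--             out.append("Drop the base")
--             run += 1
--             if run == 3:
--                 out.append("!!!Break the base!!!")
--                 run = 0
--     return " ".join(out)
-- ===== Notes on version B (the rewrite author's own statement) =====
-- stated objective: simpler
-- what changed: B maintains a running counter of consecutive 'Drop the base' tokens instead of re-slicing and re-counting the last three list entries every iteration.
import Mathlib
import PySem

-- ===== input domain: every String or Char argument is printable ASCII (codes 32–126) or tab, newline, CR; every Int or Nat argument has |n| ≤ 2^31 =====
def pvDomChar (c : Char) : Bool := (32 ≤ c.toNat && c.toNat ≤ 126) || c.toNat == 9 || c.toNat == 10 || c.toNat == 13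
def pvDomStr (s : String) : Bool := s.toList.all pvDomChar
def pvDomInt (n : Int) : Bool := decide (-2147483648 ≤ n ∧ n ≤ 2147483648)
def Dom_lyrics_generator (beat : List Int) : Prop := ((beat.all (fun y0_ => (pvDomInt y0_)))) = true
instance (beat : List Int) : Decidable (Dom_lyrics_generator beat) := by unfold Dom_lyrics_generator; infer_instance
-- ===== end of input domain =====

-- B replaces A's per-iteration re-slice-and-count of the last three entries by a running
-- counter of consecutive "Drop the base" tokens (objective: simpler decomposition, one state
-- integer instead of a tail rescan each step).

-- ===== PORT A =====
-- loop body of A: the two appends, then the last-3 rescan check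
def lyricsStepA (bl : List String) (x : Int) : List String :=
  let bl :=
    if x == 0 then bl ++ ["Boom"]
    else if x == 1 then bl ++ ["Drop the base"]
    else bl
  if 3 ≤ bl.length ∧ (PySem.List.slice bl (some (-3)) none).count "Drop the base" = 3 then
    bl ++ ["!!!Break the base!!!"]
  else bl

def lyrics_generator (beat : List Int) : String :=
  PySem.Str.join " " (beat.foldl lyricsStepA [])

-- ===== PORT B =====
-- loop body of B: state is (output list, run counter)
def lyricsStepB (st : List String × Nat) (x : Int) : List String × Nat :=
  if x == 0 then (st.1 ++ ["Boom"], 0)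
  else if x == 1 then
    let run := st.2 + 1
    if run == 3 then (st.1 ++ ["Drop the base"] ++ ["!!!Break the base!!!"], 0)
    else (st.1 ++ ["Drop the base"], run)
  else st

def lyrics_generator_alt (beat : List Int) : String :=
  PySem.Str.join " " (beat.foldl lyricsStepB ([], 0)).1

-- ===== PRECONDITION & SPEC =====
def Spec_lyrics_generator (beat : List Int) (out : String) : Prop := out = lyrics_generator_alt beat
instance (beat : List Int) (out : String) : Decidable (Spec_lyrics_generator beat out) := by unfold Spec_lyrics_generator; infer_instance

-- ===== CLAIM (what is proved, stated in full; the proofs are below) =====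
def Claim_equal_lyrics_generator : Prop := ∀ (beat : List Int), Dom_lyrics_generator beat → Spec_lyrics_generator beat (lyrics_generator beat)

-- ===== LEMMAS AND PROOFS =====

-- number of trailing "Drop the base" entries
def tdrops (bl : List String) : Nat := (bl.reverse.takeWhile (· == "Drop the base")).length

theorem tdrops_append (bl : List String) (s : String) :
    tdrops (bl ++ [s]) = if s = "Drop the base" then tdrops bl + 1 else 0 := by
  simp only [tdrops, List.reverse_append, List.reverse_singleton, List.singleton_append,
    List.takeWhile_cons]
  by_cases h : s = "Drop the base" <;> simp [h]

theorem count_take_eq_iff (a : String) :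
    ∀ (r : List String) (n : Nat), n ≤ r.length →
      ((r.take n).count a = n ↔ n ≤ (r.takeWhile (· == a)).length) := by
  intro r
  induction r with
  | nil =>
    intro n h
    have hn : n = 0 := by simpa using h
    subst hn; simp
  | cons b rs ih =>
    intro n h
    cases n with
    | zero => simp
    | succ n =>
      by_cases hb : b = a
      · subst hb
        simp
        exact ih n (by simpa using h)
      · constructor
        · intro hc
          exfalso
          have h1 : (rs.take n).count a ≤ n := by
            calc (rs.take n).count a ≤ (rs.take n).length := List.count_le_length
            _ ≤ n := by simp
          simp [hb] at hc
          omega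
        · intro hc
          simp [hb] at hc
  
theorem tdrops_le (bl : List String) : tdrops bl ≤ bl.length := by
  simpa [tdrops] using le_trans (List.takeWhile_sublist (· == "Drop the base")).length_le
    (le_of_eq bl.length_reverse)

theorem condA_iff (bl : List String) :
    (3 ≤ bl.length ∧ (PySem.List.slice bl (some (-3)) none).count "Drop the base" = 3) ↔
      3 ≤ tdrops bl := by
  rw [PySem.List.slice_from_neg_ofNat bl 3 (by omega)]
  by_cases h : 3 ≤ bl.length
  · have hdrop : bl.drop (bl.length - 3) = (bl.reverse.take 3).reverse := by
      rw [List.take_reverse]; simp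
    rw [hdrop]
    have := count_take_eq_iff "Drop the base" bl.reverse 3 (by simpa using h)
    simp only [List.count_reverse]
    rw [this]
    simp [tdrops, h]
  · have := tdrops_le bl
    omega

theorem fold_eq : ∀ (beat : List Int) (bl : List String) (cnt : Nat),
    cnt = tdrops bl → cnt < 3 →
    beat.foldl lyricsStepA bl = (beat.foldl lyricsStepB (bl, cnt)).1 := by
  intro beat
  induction beat with
  | nil => intro bl cnt _ _; simp
  | cons x bs ih =>
    intro bl cnt hinv hlt
    simp only [List.foldl_cons]
    by_cases h0 : x = 0
    · have hA : lyricsStepA bl x = bl ++ ["Boom"] := by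
        have : ¬ (3 ≤ (bl ++ ["Boom"]).length ∧
            (PySem.List.slice (bl ++ ["Boom"]) (some (-3)) none).count "Drop the base" = 3) := by
          rw [condA_iff]; rw [tdrops_append]; simp
        have hx : (x == 0) = true := by simp [h0]
        simp only [lyricsStepA, hx, if_true]
        rw [if_neg this]
      have hB : lyricsStepB (bl, cnt) x = (bl ++ ["Boom"], 0) := by
        simp [lyricsStepB, h0]
      rw [hA, hB]
      exact ih _ 0 (by rw [tdrops_append]; simp) (by omega)
    · by_cases h1 : x = 1
      · by_cases h2 : cnt = 2
        · have hA : lyricsStepA bl x =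
              bl ++ ["Drop the base"] ++ ["!!!Break the base!!!"] := by
            have : (3 ≤ (bl ++ ["Drop the base"]).length ∧
                (PySem.List.slice (bl ++ ["Drop the base"]) (some (-3)) none).count "Drop the base" = 3) := by
              rw [condA_iff, tdrops_append]; simp [← hinv, h2]
            have hx0 : (x == 0) = false := by simp [h0]
            have hx1 : (x == 1) = true := by simp [h1]
            simp only [lyricsStepA, hx0, hx1, if_true, Bool.false_eq_true, if_false]
            rw [if_pos this]
          have hB : lyricsStepB (bl, cnt) x =
              (bl ++ ["Drop the base"] ++ ["!!!Break the base!!!"], 0) := by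
            simp [lyricsStepB, h1, h2]
          rw [hA, hB]
          exact ih _ 0 (by rw [tdrops_append]; simp) (by omega)
        · have hA : lyricsStepA bl x = bl ++ ["Drop the base"] := by
            have : ¬ (3 ≤ (bl ++ ["Drop the base"]).length ∧
                (PySem.List.slice (bl ++ ["Drop the base"]) (some (-3)) none).count "Drop the base" = 3) := by
              rw [condA_iff, tdrops_append]; simp [← hinv]; omega
            have hx0 : (x == 0) = false := by simp [h0]
            have hx1 : (x == 1) = true := by simp [h1]
            simp only [lyricsStepA, hx0, hx1, if_true, Bool.false_eq_true, if_false]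
            rw [if_neg this]
          have hB : lyricsStepB (bl, cnt) x = (bl ++ ["Drop the base"], cnt + 1) := by
            simp [lyricsStepB, h1]; omega
          rw [hA, hB]
          exact ih _ (cnt + 1) (by rw [tdrops_append]; simp [hinv]) (by omega)
      · have hA : lyricsStepA bl x = bl := by
          have : ¬ (3 ≤ bl.length ∧
              (PySem.List.slice bl (some (-3)) none).count "Drop the base" = 3) := by
            rw [condA_iff]; omega
          have hx0 : (x == 0) = false := by simp [h0]
          have hx1 : (x == 1) = false := by simp [h1]
          simp only [lyricsStepA, hx0, hx1, Bool.false_eq_true, if_false]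
          rw [if_neg this]
        have hB : lyricsStepB (bl, cnt) x = (bl, cnt) := by
          simp [lyricsStepB, h0, h1]
        rw [hA, hB]
        exact ih _ cnt hinv hlt

-- ===== VERDICT (by name: the statement is the Claim_ definition above) =====
theorem lyrics_generator_spec : Claim_equal_lyrics_generator := by
  intro beat _
  unfold Spec_lyrics_generator lyrics_generator lyrics_generator_alt
  rw [fold_eq beat [] 0 (by simp [tdrops]) (by omega)]
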